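-- pv_equiv track=rewrite | github.com/KiPhuong/SQli-RL-with-WAF | sql_prefix_validator.py | _tokenize_sql
-- ===== SOURCE A (Python) =====
-- from typing import List, Tuple, Optional, Set
--
-- def _tokenize_sql(sql_text: str) -> List[str]:
--     """Simple SQL tokenizer that preserves important structure."""
--     tokens = []
--     i = 0
--     n = len(sql_text)
--
--     while i < n:
--         ch = sql_text[i]
--
--         # Skip whitespace but preserve newlines for comment handling
--         if ch.isspace():
--             if ch == '\n':
--                 tokens.append('\n')
--             i += 1
--             continue
--
--         # Multi-character operators and comments
--         if i < n - 1:
--             two_char = sql_text[i:i+2]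
--             if two_char in ['--', '/*', '*/', '<=', '>=', '<>', '!=']:
--                 tokens.append(two_char)
--                 i += 2
--                 continue
--
--         # Single character tokens
--         if ch in "(),'\"=<>+-*/;#.":
--             tokens.append(ch)
--             i += 1
--             continue
--
--         # Word tokens (identifiers, keywords, numbers)
--         if ch.isalnum() or ch == '_':
--             j = i
--             while j < n and (sql_text[j].isalnum() or sql_text[j] == '_'):
--                 j += 1
--             tokens.append(sql_text[i:j])
--             i = j
--             continue
--
--         # Skip unknown characters
--         i += 1
--
--     return tokens
-- ===== SOURCE B (Python) =====
-- from typing import List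
--
-- def _tokenize_sql(sql_text: str) -> List[str]:
--     """Two-phase tokenizer: classify/group characters into units, then merge
--     adjacent symbol pairs into two-char operators."""
--     # Phase 1: one unit per character run — word runs grouped, everything else single.
--     units = []
--     for ch in sql_text:
--         if ch.isalnum() or ch == '_':
--             if units and units[-1][0] == 'w':
--                 units[-1] = ('w', units[-1][1] + ch)
--             else:
--                 units.append(('w', ch))
--         elif ch == '\n':
--             units.append(('n', ch))
--         elif ch in "(),'\"=<>+-*/;#.!":
--             units.append(('s', ch))
--         else:
--             units.append(('g', ''))  # gap: whitespace or unknown character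
--     # Phase 2: merge adjacent symbol units into two-char operators; drop gaps
--     # and a lone '!' (which is only a token as part of '!=').
--     tokens = []
--     k = 0
--     m = len(units)
--     while k < m:
--         kind, text = units[k]
--         if kind == 's' and k + 1 < m and units[k + 1][0] == 's' \
--                 and text + units[k + 1][1] in ('--', '/*', '*/', '<=', '>=', '<>', '!='):
--             tokens.append(text + units[k + 1][1])
--             k += 2
--         elif kind == 'g' or (kind == 's' and text == '!'):
--             k += 1
--         else:
--             tokens.append(text)
--             k += 1
--     return tokens
-- ===== Notes on version B (the rewrite author's own statement) =====
-- stated objective: alternative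
-- what changed: A's single index-driven scanner with lookahead slicing is replaced by a two-phase pipeline: phase 1 classifies each character and groups consecutive word characters into units, phase 2 merges adjacent symbol units into two-char operators and drops gap units and an unpaired exclamation mark.
import Mathlib
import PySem

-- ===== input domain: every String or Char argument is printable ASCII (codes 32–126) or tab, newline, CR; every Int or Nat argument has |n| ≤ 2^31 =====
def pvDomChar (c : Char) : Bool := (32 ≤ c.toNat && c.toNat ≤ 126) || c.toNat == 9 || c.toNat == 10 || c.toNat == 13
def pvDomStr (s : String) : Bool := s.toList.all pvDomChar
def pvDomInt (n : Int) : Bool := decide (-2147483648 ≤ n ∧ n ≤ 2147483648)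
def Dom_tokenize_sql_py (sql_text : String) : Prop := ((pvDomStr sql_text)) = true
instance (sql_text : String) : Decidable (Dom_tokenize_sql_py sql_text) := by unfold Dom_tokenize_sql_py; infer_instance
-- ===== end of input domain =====

-- B replaces A's single index-driven scanner by a two-phase pipeline (classify/group chars into units, then
-- merge adjacent symbol units into two-char operators); objective: alternative structure, not speed.

-- the two-char operators ['--', '/*', '*/', '<=', '>=', '<>', '!='] (shared literal of both Pythons)
def pvOps : List (List Char) :=
  [['-','-'], ['/','*'], ['*','/'], ['<','='], ['>','='], ['<','>'], ['!','=']]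

-- "ch.isalnum() or ch == '_'" (the same expression appears in both Pythons)
def pvIsWord (c : Char) : Bool := PySem.Chars.isalnum c || c = '_'

-- ===== PORT A =====
-- A's single-char token class "(),'\"=<>+-*/;#."
def pvSinglesA : List Char :=
  ['(',')',',','\'','"','=','<','>','+','-','*','/',';','#','.']

-- inner while loop: `while j < n and (sql_text[j].isalnum() or sql_text[j] == '_'): j += 1`
def aWordEnd (cs : List Char) (n j : Nat) : Nat :=
  if j < n ∧ pvIsWord cs[j]! then aWordEnd cs n (j + 1) else j
termination_by n - j
decreasing_by omega

lemma aWordEnd_ge (cs : List Char) (n j : Nat) : j ≤ aWordEnd cs n j := by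
  unfold aWordEnd
  split
  · exact le_trans (by omega) (aWordEnd_ge cs n (j + 1))
  · exact le_refl j
termination_by n - j
decreasing_by omega

-- the outer `while i < n` loop of A, with its `tokens` accumulator
def aLoop (cs : List Char) (n i : Nat) (tokens : List String) : List String :=
  if hi : i < n then
    let ch := cs[i]!
    if PySem.Chars.isspace ch then
      aLoop cs n (i + 1) (if ch = '\n' then tokens ++ ["\n"] else tokens)
    else if i < n - 1 ∧ PySem.List.slice cs (some (i : Int)) (some ((i : Int) + 2)) ∈ pvOps then
      aLoop cs n (i + 2) (tokens ++ [String.ofList (PySem.List.slice cs (some (i : Int)) (some ((i : Int) + 2)))])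
    else if ch ∈ pvSinglesA then
      aLoop cs n (i + 1) (tokens ++ [String.ofList [ch]])
    else if hw : pvIsWord ch then
      aLoop cs n (aWordEnd cs n i)
        (tokens ++ [String.ofList (PySem.List.slice cs (some (i : Int)) (some ((aWordEnd cs n i : Nat) : Int)))])
    else
      aLoop cs n (i + 1) tokens
  else tokens
termination_by n - i
decreasing_by
  · omega
  · omega
  · omega
  · -- word branch: j = aWordEnd cs n i and the guard held at i, so i + 1 ≤ j
    have h1 : i + 1 ≤ aWordEnd cs n i := by
      rw [aWordEnd, if_pos ⟨hi, hw⟩]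
      exact aWordEnd_ge cs n (i + 1)
    omega
  · omega

def tokenize_sql_py (sql_text : String) : List String :=
  aLoop sql_text.toList sql_text.toList.length 0 []

-- ===== PORT B =====
-- B's symbol-character class (A's single-char class plus '!')
def pvSymB : List Char :=
  ['(',')',',','\'','"','=','<','>','+','-','*','/',';','#','.','!']

-- phase 1 body: classify one character, extending a trailing word unit
def bStep (units : List (Char × List Char)) (ch : Char) : List (Char × List Char) :=
  if pvIsWord ch then
    match units.getLast? with
    | some (k, t) =>
        if k = 'w' then units.dropLast ++ [('w', t ++ [ch])] else units ++ [('w', [ch])]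
    | none => units ++ [('w', [ch])]
  else if ch = '\n' then units ++ [('n', [ch])]
  else if ch ∈ pvSymB then units ++ [('s', [ch])]
  else units ++ [('g', [])]      -- gap: whitespace or unknown character

-- phase 2: merge adjacent symbol units into two-char operators; drop gaps and a lone '!'
def bMerge : List (Char × List Char) → List String
  | [] => []
  | (k, t) :: rest =>
    match h : rest with
    | (k2, t2) :: rest2 =>
      if k = 's' ∧ k2 = 's' ∧ (t ++ t2) ∈ pvOps then
        String.ofList (t ++ t2) :: bMerge rest2
      else if k = 'g' ∨ (k = 's' ∧ t = ['!']) then bMerge rest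
      else String.ofList t :: bMerge rest
    | [] =>
      if k = 'g' ∨ (k = 's' ∧ t = ['!']) then bMerge rest
      else String.ofList t :: bMerge rest
termination_by us => us.length
decreasing_by all_goals (subst h; simp)

def tokenize_sql_py_alt (sql_text : String) : List String :=
  bMerge (sql_text.toList.foldl bStep [])

-- ===== PRECONDITION & SPEC =====
def Spec_tokenize_sql_py (sql_text : String) (out : List String) : Prop := out = tokenize_sql_py_alt sql_text
instance (sql_text : String) (out : List String) : Decidable (Spec_tokenize_sql_py sql_text out) := by unfold Spec_tokenize_sql_py; infer_instance

-- ===== CLAIM (what is proved, stated in full; the proofs are below) =====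
def Claim_equal_tokenize_sql_py : Prop := ∀ (sql_text : String), Dom_tokenize_sql_py sql_text → Spec_tokenize_sql_py sql_text (tokenize_sql_py sql_text)

-- ===== LEMMAS AND PROOFS =====

-- reference tokenization, by structural recursion on the character list
def tok : List Char → List String
  | [] => []
  | c :: rest =>
    if PySem.Chars.isspace c then
      (if c = '\n' then ["\n"] else []) ++ tok rest
    else
      match h : rest with
      | c2 :: rest2 =>
        if [c, c2] ∈ pvOps then String.ofList [c, c2] :: tok rest2
        else if c ∈ pvSinglesA then String.ofList [c] :: tok rest
        else if pvIsWord c then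
          String.ofList (c :: rest.takeWhile pvIsWord) :: tok (rest.dropWhile pvIsWord)
        else tok rest
      | [] =>
        if c ∈ pvSinglesA then [String.ofList [c]]
        else if pvIsWord c then [String.ofList [c]]
        else []
termination_by cs => cs.length
decreasing_by
  all_goals try subst h
  all_goals try simp
  all_goals simpa [Nat.lt_succ_iff] using List.length_dropWhile_le pvIsWord (c2 :: rest2)

-- units produced by phase 1, characterized front-to-back
def unitsOf : List Char → List (Char × List Char)
  | [] => []
  | c :: rest =>
    if pvIsWord c then ('w', c :: rest.takeWhile pvIsWord) :: unitsOf (rest.dropWhile pvIsWord)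
    else if c = '\n' then ('n', [c]) :: unitsOf rest
    else if c ∈ pvSymB then ('s', [c]) :: unitsOf rest
    else ('g', []) :: unitsOf rest
termination_by cs => cs.length
decreasing_by
  · simpa [Nat.lt_succ_iff] using List.length_dropWhile_le pvIsWord rest
  · simp
  · simp
  · simp

-- character-class facts
-- small takeWhile bookkeeping (no Mathlib lemma states these two forms directly)
lemma take_len_takeWhile (p : Char → Bool) (l : List Char) :
    l.take (l.takeWhile p).length = l.takeWhile p := by
  induction l with
  | nil => simp
  | cons c rest ih =>
    by_cases h : p c <;> simp [h, ih]

lemma drop_len_takeWhile (p : Char → Bool) (l : List Char) :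
    l.drop (l.takeWhile p).length = l.dropWhile p := by
  induction l with
  | nil => simp
  | cons c rest ih =>
    by_cases h : p c <;> simp [h, ih]

lemma word_not_space {c : Char} (h : pvIsWord c = true) : PySem.Chars.isspace c = false := by
  simp only [PySem.Chars.isspace, pvIsWord, PySem.Chars.isalnum, PySem.Chars.isalpha,
    PySem.Chars.isdigit, PySem.Chars.isupper, PySem.Chars.islower, Char.le_def,
    UInt32.le_iff_toNat_le, Char.ext_iff, UInt32.ext_iff, Char.toNat_val, Bool.or_eq_true,
    Bool.and_eq_true, decide_eq_true_eq, Bool.or_eq_false_iff, Bool.and_eq_false_iff,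
    decide_eq_false_iff_not, Char.reduceVal, UInt32.reduceToNat] at *
  omega

lemma sym_not_space {c : Char} (h : c ∈ pvSymB) : PySem.Chars.isspace c = false := by
  fin_cases h <;> decide

lemma sym_not_word {c : Char} (h : c ∈ pvSymB) : pvIsWord c = false := by
  fin_cases h <;> decide

lemma singles_sub_sym {c : Char} (h : c ∈ pvSinglesA) : c ∈ pvSymB := by
  fin_cases h <;> decide

lemma sym_singles {c : Char} (h : c ∈ pvSymB) (h2 : c ≠ '!') : c ∈ pvSinglesA := by
  fin_cases h <;> simp_all <;> decide

lemma op_chars {c c2 : Char} (h : [c, c2] ∈ pvOps) :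
    c ∈ pvSymB ∧ c2 ∈ pvSymB ∧ pvIsWord c = false ∧ pvIsWord c2 = false ∧ c2 ≠ '\n' := by
  fin_cases h <;> decide

lemma word_not_single {c : Char} (h : pvIsWord c = true) : c ∉ pvSinglesA := by
  intro hs
  rw [sym_not_word (singles_sub_sym hs)] at h
  exact Bool.false_ne_true h

lemma tok_nil : tok [] = [] := by rw [tok.eq_def]

lemma unitsOf_nil : unitsOf [] = [] := by rw [unitsOf.eq_def]

-- shape lemmas for tok on an exposed cons
lemma tok_space (c : Char) (rest : List Char) (h : PySem.Chars.isspace c = true) :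
    tok (c :: rest) = (if c = '\n' then ["\n"] else []) ++ tok rest := by
  rw [tok.eq_def]; rcases rest with _ | ⟨c2, rest2⟩ <;> simp [h, tok_nil]

lemma tok_op (c c2 : Char) (rest2 : List Char) (hsp : PySem.Chars.isspace c = false)
    (hop : [c, c2] ∈ pvOps) :
    tok (c :: c2 :: rest2) = String.ofList [c, c2] :: tok rest2 := by
  rw [tok.eq_def]; simp [hsp, hop]

lemma tok_single (c : Char) (rest : List Char) (hsp : PySem.Chars.isspace c = false)
    (hnop : ∀ c2 rest2, rest = c2 :: rest2 → [c, c2] ∉ pvOps) (hsg : c ∈ pvSinglesA) :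
    tok (c :: rest) = String.ofList [c] :: tok rest := by
  rw [tok.eq_def]
  rcases rest with _ | ⟨c2, rest2⟩ <;> simp [hsp, hsg, hnop c2 rest2 rfl, tok_nil]

lemma tok_word (c : Char) (rest : List Char) (hsp : PySem.Chars.isspace c = false)
    (hnop : ∀ c2 rest2, rest = c2 :: rest2 → [c, c2] ∉ pvOps) (hsg : c ∉ pvSinglesA)
    (hw : pvIsWord c = true) :
    tok (c :: rest) =
      String.ofList (c :: rest.takeWhile pvIsWord) :: tok (rest.dropWhile pvIsWord) := by
  rw [tok.eq_def]
  rcases rest with _ | ⟨c2, rest2⟩ <;> simp [hsp, hsg, hw, hnop c2 rest2 rfl, tok_nil]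

lemma tok_skip (c : Char) (rest : List Char)
    (hnop : ∀ c2 rest2, rest = c2 :: rest2 → [c, c2] ∉ pvOps) (hsg : c ∉ pvSinglesA)
    (hw : pvIsWord c = false) (hnl : c ≠ '\n') :
    tok (c :: rest) = tok rest := by
  rw [tok.eq_def]
  by_cases hsp : PySem.Chars.isspace c = true
  · rcases rest with _ | ⟨c2, rest2⟩ <;> simp [hsp, hnl, tok_nil]
  · rcases rest with _ | ⟨c2, rest2⟩ <;> simp [hsp, hsg, hw, hnop c2 rest2 rfl, tok_nil]

-- shape lemmas for unitsOf on an exposed cons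
lemma unitsOf_w (c : Char) (rest : List Char) (hw : pvIsWord c = true) :
    unitsOf (c :: rest) =
      ('w', c :: rest.takeWhile pvIsWord) :: unitsOf (rest.dropWhile pvIsWord) := by
  rw [unitsOf.eq_def]; simp [hw]

lemma unitsOf_n (c : Char) (rest : List Char) (hw : pvIsWord c = false) (hn : c = '\n') :
    unitsOf (c :: rest) = ('n', [c]) :: unitsOf rest := by
  subst hn; rw [unitsOf.eq_def]; simp [hw]

lemma unitsOf_s (c : Char) (rest : List Char) (hw : pvIsWord c = false) (hn : c ≠ '\n')
    (hs : c ∈ pvSymB) : unitsOf (c :: rest) = ('s', [c]) :: unitsOf rest := by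
  rw [unitsOf.eq_def]; simp [hw, hn, hs]

lemma unitsOf_g (c : Char) (rest : List Char) (hw : pvIsWord c = false) (hn : c ≠ '\n')
    (hs : c ∉ pvSymB) : unitsOf (c :: rest) = ('g', []) :: unitsOf rest := by
  rw [unitsOf.eq_def]; simp [hw, hn, hs]

-- shape lemmas for bMerge on an exposed cons
lemma bMerge_w (t : List Char) (us : List (Char × List Char)) :
    bMerge (('w', t) :: us) = String.ofList t :: bMerge us := by
  rw [bMerge.eq_def]; rcases us with _ | ⟨⟨k2, t2⟩, us2⟩ <;> simp

lemma bMerge_n (t : List Char) (us : List (Char × List Char)) :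
    bMerge (('n', t) :: us) = String.ofList t :: bMerge us := by
  rw [bMerge.eq_def]; rcases us with _ | ⟨⟨k2, t2⟩, us2⟩ <;> simp

lemma bMerge_g (t : List Char) (us : List (Char × List Char)) :
    bMerge (('g', t) :: us) = bMerge us := by
  rw [bMerge.eq_def]; rcases us with _ | ⟨⟨k2, t2⟩, us2⟩ <;> simp

lemma bMerge_s_merge (c c2 : Char) (us : List (Char × List Char)) (hop : [c, c2] ∈ pvOps) :
    bMerge (('s', [c]) :: ('s', [c2]) :: us) = String.ofList [c, c2] :: bMerge us := by
  rw [bMerge.eq_def]; simp [hop]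

lemma bMerge_s (c : Char) (us : List (Char × List Char))
    (hno : ∀ u us2, us = u :: us2 → ¬(u.1 = 's' ∧ [c] ++ u.2 ∈ pvOps)) :
    bMerge (('s', [c]) :: us) =
      (if c = '!' then [] else [String.ofList [c]]) ++ bMerge us := by
  rw [bMerge.eq_def]
  rcases us with _ | ⟨⟨k2, t2⟩, us2⟩
  · by_cases hbang : c = '!' <;> simp [hbang]
  · have := hno (k2, t2) us2 rfl
    by_cases hbang : c = '!' <;> simp_all

-- ==== A-side: the scanner equals tok on the remaining suffix ====
lemma aWordEnd_eq (cs : List Char) (j : Nat) :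
    aWordEnd cs cs.length j = j + ((cs.drop j).takeWhile pvIsWord).length := by
  rw [aWordEnd]
  by_cases hlt : j < cs.length
  · have hdrop := List.drop_eq_getElem_cons hlt
    have hget : cs[j]! = cs[j] := getElem!_pos cs j hlt
    by_cases hw : pvIsWord cs[j] = true
    · rw [if_pos ⟨hlt, by rw [hget]; exact hw⟩, aWordEnd_eq cs (j + 1), hdrop,
        List.takeWhile_cons, hw]
      simp; omega
    · rw [if_neg (by rw [hget]; tauto), hdrop, List.takeWhile_cons]
      simp [hw]
  · rw [if_neg (by tauto), List.drop_eq_nil_of_le (by omega)]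
    simp
termination_by cs.length - j
decreasing_by omega

lemma aLoop_eq (cs : List Char) (i : Nat) (tokens : List String) :
    aLoop cs cs.length i tokens = tokens ++ tok (cs.drop i) := by
  rw [aLoop]
  by_cases hi : i < cs.length
  · rw [dif_pos hi]
    have hget : cs[i]! = cs[i] := getElem!_pos cs i hi
    have hdrop : cs.drop i = cs[i] :: cs.drop (i + 1) := List.drop_eq_getElem_cons hi
    rw [hget]
    by_cases hsp : PySem.Chars.isspace cs[i] = true
    · rw [if_pos hsp, aLoop_eq cs (i + 1), hdrop, tok_space _ _ hsp]
      by_cases hnl : cs[i] = '\n' <;> simp [hnl]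
    · rw [if_neg hsp]
      have hspf : PySem.Chars.isspace cs[i] = false := by
        exact Bool.not_eq_true _ ▸ hsp
      rcases h2 : cs.drop (i + 1) with _ | ⟨c2, rest2⟩
      · -- i is the last index: the two-char branch cannot fire
        have hlast : i + 1 = cs.length := by
          have := List.drop_eq_nil_iff.mp h2; omega
        have hnop : ∀ c2 rest2, cs.drop (i + 1) = c2 :: rest2 → [cs[i], c2] ∉ pvOps := by
          intro c2 rest2 hx; rw [h2] at hx; cases hx
        rw [if_neg (show ¬(i < cs.length - 1 ∧
            PySem.List.slice cs (some (i : Int)) (some ((i : Int) + 2)) ∈ pvOps) from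
            fun hx => by omega)]
        by_cases hsg : cs[i] ∈ pvSinglesA
        · rw [if_pos hsg, aLoop_eq cs (i + 1), hdrop, tok_single _ _ hspf hnop hsg]
          simp
        · rw [if_neg hsg]
          by_cases hw : pvIsWord cs[i] = true
          · rw [dif_pos hw]
            have hj : aWordEnd cs cs.length i = i + 1 := by
              rw [aWordEnd_eq, hdrop, h2, List.takeWhile_cons, hw]; simp
            rw [hj]
            have hsl : PySem.List.slice cs (some (i : Int)) (some ((i + 1 : Nat) : Int)) =
                [cs[i]] := by
              rw [PySem.List.slice_natCast, hdrop, h2,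
                show i + 1 - i = 1 from by omega]
              rfl
            rw [hsl, aLoop_eq cs (i + 1), hdrop, tok_word _ _ hspf hnop hsg hw, h2]
            simp
          · rw [dif_neg hw, aLoop_eq cs (i + 1), hdrop,
              tok_skip _ _ hnop hsg (by simpa using hw)
                (fun hx => by rw [hx] at hsp; exact hsp (by decide))]
      · have hi1 : i + 1 < cs.length := by
          by_contra hx
          rw [List.drop_eq_nil_of_le (by omega)] at h2; simp at h2
        have hcons := List.drop_eq_getElem_cons hi1
        rw [h2] at hcons
        have hc2 : c2 = cs[i + 1] := (List.cons_eq_cons.mp hcons).1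
        have hr2 : rest2 = cs.drop (i + 2) := (List.cons_eq_cons.mp hcons).2
        have hslice : PySem.List.slice cs (some (i : Int)) (some ((i : Int) + 2)) =
            [cs[i], c2] := by
          rw [show ((i : Int) + 2) = ((i + 2 : Nat) : Int) from by push_cast; ring,
            PySem.List.slice_natCast, hdrop, h2, show i + 2 - i = 2 from by omega]
          rfl
        by_cases hop : [cs[i], c2] ∈ pvOps
        · rw [if_pos ⟨by omega, by rw [hslice]; exact hop⟩, hslice,
            aLoop_eq cs (i + 2), ← hr2, hdrop, h2, tok_op _ _ _ hspf hop]
          simp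
        · have hnop : ∀ c2' rest2', cs.drop (i + 1) = c2' :: rest2' →
              [cs[i], c2'] ∉ pvOps := by
            intro c2' rest2' hx
            rw [h2] at hx
            rw [(List.cons_eq_cons.mp hx).1] at hop
            exact hop
          rw [if_neg (fun hx => hop (hslice ▸ hx.2))]
          by_cases hsg : cs[i] ∈ pvSinglesA
          · rw [if_pos hsg, aLoop_eq cs (i + 1), hdrop, tok_single _ _ hspf hnop hsg]
            simp
          · rw [if_neg hsg]
            by_cases hw : pvIsWord cs[i] = true
            · rw [dif_pos hw]
              have htw : (cs.drop i).takeWhile pvIsWord =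
                  cs[i] :: (cs.drop (i + 1)).takeWhile pvIsWord := by
                rw [hdrop, List.takeWhile_cons, hw]
                simp
              have hj : aWordEnd cs cs.length i =
                  (i + 1) + ((cs.drop (i + 1)).takeWhile pvIsWord).length := by
                rw [aWordEnd_eq, htw]; simp; omega
              have hsl : PySem.List.slice cs (some (i : Int))
                  (some ((aWordEnd cs cs.length i : Nat) : Int)) =
                  (cs.drop i).takeWhile pvIsWord := by
                rw [PySem.List.slice_natCast, hj,
                  show (i + 1) + ((cs.drop (i + 1)).takeWhile pvIsWord).length - i =
                    ((cs.drop i).takeWhile pvIsWord).length from by rw [htw]; simp; omega,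
                  take_len_takeWhile]
              have hdw : cs.drop (aWordEnd cs cs.length i) =
                  (cs.drop (i + 1)).dropWhile pvIsWord := by
                rw [hj, ← List.drop_drop, drop_len_takeWhile]
              rw [hsl, htw, aLoop_eq cs (aWordEnd cs cs.length i), hdw, hdrop,
                tok_word _ _ hspf hnop hsg hw]
              simp
            · rw [dif_neg hw, aLoop_eq cs (i + 1), hdrop,
                tok_skip _ _ hnop hsg (by simpa using hw)
                  (fun hx => by rw [hx] at hsp; exact hsp (by decide))]
  · rw [dif_neg hi, List.drop_eq_nil_of_le (by omega)]
    simp [tok]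
termination_by cs.length - i
decreasing_by all_goals omega

-- ==== B-side: phase 1 equals unitsOf, phase 2 on unitsOf equals tok ====
lemma phase1_both (cs : List Char) :
    (∀ acc : List (Char × List Char), (∀ t, acc.getLast? ≠ some ('w', t)) →
        cs.foldl bStep acc = acc ++ unitsOf cs) ∧
    (∀ (acc : List (Char × List Char)) (t : List Char),
        cs.foldl bStep (acc ++ [('w', t)]) =
          acc ++ ('w', t ++ cs.takeWhile pvIsWord) :: unitsOf (cs.dropWhile pvIsWord)) := by
  induction cs with
  | nil =>
    refine ⟨fun acc _ => by simp [unitsOf], fun acc t => by simp [unitsOf]⟩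
  | cons c rest ih =>
    refine ⟨?_, ?_⟩
    · intro acc hacc
      simp only [List.foldl_cons]
      by_cases hw : pvIsWord c = true
      · have hstep : bStep acc c = acc ++ [('w', [c])] := by
          unfold bStep
          rw [if_pos hw]
          rcases hl : acc.getLast? with _ | ⟨k, t⟩
          · rfl
          · have hk : k ≠ 'w' := fun h => hacc t (by rw [hl, h])
            simp [hk]
        rw [hstep, ih.2 acc [c], unitsOf_w c rest hw]
        simp
      · by_cases hn : c = '\n'
        · have hstep : bStep acc c = acc ++ [('n', [c])] := by
            unfold bStep; rw [if_neg (by simp [hw]), if_pos hn]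
          rw [hstep, ih.1 (acc ++ [('n', [c])]) (by simp), unitsOf_n c rest (by simpa using hw) hn]
          simp
        · by_cases hs : c ∈ pvSymB
          · have hstep : bStep acc c = acc ++ [('s', [c])] := by
              unfold bStep; rw [if_neg (by simp [hw]), if_neg hn, if_pos hs]
            rw [hstep, ih.1 (acc ++ [('s', [c])]) (by simp), unitsOf_s c rest (by simpa using hw) hn hs]
            simp
          · have hstep : bStep acc c = acc ++ [('g', [])] := by
              unfold bStep; rw [if_neg (by simp [hw]), if_neg hn, if_neg hs]
            rw [hstep, ih.1 (acc ++ [('g', [])]) (by simp), unitsOf_g c rest (by simpa using hw) hn hs]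
            simp
    · intro acc t
      simp only [List.foldl_cons]
      by_cases hw : pvIsWord c = true
      · have hstep : bStep (acc ++ [('w', t)]) c = acc ++ [('w', t ++ [c])] := by
          unfold bStep
          rw [if_pos hw, List.getLast?_concat]
          simp
        rw [hstep, ih.2 acc (t ++ [c]), List.takeWhile_cons, List.dropWhile_cons]
        simp [hw]
      · have htl : (acc ++ [('w', t)]).getLast? = some ('w', t) := by simp
        by_cases hn : c = '\n'
        · have hstep : bStep (acc ++ [('w', t)]) c = (acc ++ [('w', t)]) ++ [('n', [c])] := by
            unfold bStep; rw [if_neg (by simp [hw]), if_pos hn]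
          rw [hstep, ih.1 ((acc ++ [('w', t)]) ++ [('n', [c])]) (by simp),
            List.takeWhile_cons, List.dropWhile_cons]
          simp [(show pvIsWord c = false from by simpa using hw),
            unitsOf_n c rest (by simpa using hw) hn]
        · by_cases hs : c ∈ pvSymB
          · have hstep : bStep (acc ++ [('w', t)]) c =
                (acc ++ [('w', t)]) ++ [('s', [c])] := by
              unfold bStep; rw [if_neg (by simp [hw]), if_neg hn, if_pos hs]
            rw [hstep, ih.1 ((acc ++ [('w', t)]) ++ [('s', [c])]) (by simp),
              List.takeWhile_cons, List.dropWhile_cons]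
            simp [(show pvIsWord c = false from by simpa using hw),
              unitsOf_s c rest (by simpa using hw) hn hs]
          · have hstep : bStep (acc ++ [('w', t)]) c =
                (acc ++ [('w', t)]) ++ [('g', [])] := by
              unfold bStep; rw [if_neg (by simp [hw]), if_neg hn, if_neg hs]
            rw [hstep, ih.1 ((acc ++ [('w', t)]) ++ [('g', [])]) (by simp),
              List.takeWhile_cons, List.dropWhile_cons]
            simp [(show pvIsWord c = false from by simpa using hw),
              unitsOf_g c rest (by simpa using hw) hn hs]

lemma bMerge_unitsOf (cs : List Char) : bMerge (unitsOf cs) = tok cs := by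
  rcases cs with _ | ⟨c, rest⟩
  · simp [unitsOf, bMerge, tok]
  · by_cases hw : pvIsWord c = true
    · have hsp : PySem.Chars.isspace c = false := word_not_space hw
      have hsg := word_not_single hw
      have hnop : ∀ c2 rest2, rest = c2 :: rest2 → [c, c2] ∉ pvOps := by
        intro c2 rest2 _ hop
        have := (op_chars hop).2.2.1; rw [hw] at this; cases this
      rw [unitsOf_w c rest hw, bMerge_w, tok_word _ _ hsp hnop hsg hw,
        bMerge_unitsOf (rest.dropWhile pvIsWord)]
    · by_cases hn : c = '\n'
      · rw [unitsOf_n c rest (by simpa using hw) hn, bMerge_n, tok_space _ _ (by rw [hn]; decide),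
          bMerge_unitsOf rest, hn]
        simp
      · by_cases hs : c ∈ pvSymB
        · have hsp : PySem.Chars.isspace c = false := sym_not_space hs
          rw [unitsOf_s c rest (by simpa using hw) hn hs]
          rcases hr : rest with _ | ⟨c2, rest2⟩
          · rw [bMerge_s c _ (fun u us2 h => by rw [unitsOf_nil] at h; cases h)]
            by_cases hbang : c = '!'
            · rw [tok_skip _ _ (fun _ _ h => by cases h) (by rw [hbang]; decide)
                (by rw [hbang]; decide) hn, hbang]
              simp [unitsOf, bMerge, tok]
            · rw [tok_single _ _ hsp (fun _ _ h => by cases h) (sym_singles hs hbang)]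
              simp [unitsOf, bMerge, tok, hbang]
          · by_cases hop : [c, c2] ∈ pvOps
            · have hop2 := op_chars hop
              rw [unitsOf_s c2 rest2 hop2.2.2.2.1 hop2.2.2.2.2 hop2.2.1,
                bMerge_s_merge c c2 _ hop, tok_op _ _ _ hsp hop, bMerge_unitsOf rest2]
            · -- no merge: the next unit, whatever it is, does not combine with c
              have hno : ∀ u us2, unitsOf (c2 :: rest2) = u :: us2 →
                  ¬(u.1 = 's' ∧ [c] ++ u.2 ∈ pvOps) := by
                intro u us2 hu hx
                by_cases hw2 : pvIsWord c2 = true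
                · rw [unitsOf_w c2 rest2 hw2] at hu
                  rw [(List.cons_eq_cons.mp hu).1.symm] at hx
                  simp at hx
                · by_cases hn2 : c2 = '\n'
                  · rw [unitsOf_n c2 rest2 (by simpa using hw2) hn2] at hu
                    rw [(List.cons_eq_cons.mp hu).1.symm] at hx
                    simp at hx
                  · by_cases hs2 : c2 ∈ pvSymB
                    · rw [unitsOf_s c2 rest2 (by simpa using hw2) hn2 hs2] at hu
                      rw [(List.cons_eq_cons.mp hu).1.symm] at hx
                      exact hop hx.2
                    · rw [unitsOf_g c2 rest2 (by simpa using hw2) hn2 hs2] at hu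
                      rw [(List.cons_eq_cons.mp hu).1.symm] at hx
                      simp at hx
              have hnop : ∀ c2' rest2', (c2 :: rest2 : List Char) = c2' :: rest2' →
                  [c, c2'] ∉ pvOps := by
                intro c2' rest2' hx
                rw [← (List.cons_eq_cons.mp hx).1]
                exact hop
              rw [bMerge_s c _ hno]
              by_cases hbang : c = '!'
              · rw [tok_skip _ _ hnop (by rw [hbang]; decide) (by rw [hbang]; decide) hn,
                  hbang, bMerge_unitsOf (c2 :: rest2)]
                simp
              · rw [tok_single _ _ hsp hnop (sym_singles hs hbang),
                  bMerge_unitsOf (c2 :: rest2)]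
                simp [hbang]
        · -- gap: whitespace other than newline, or an unknown character
          have hnop : ∀ c2 rest2, rest = c2 :: rest2 → [c, c2] ∉ pvOps :=
            fun _ _ _ hop => hs (op_chars hop).1
          rw [unitsOf_g c rest (by simpa using hw) hn hs, bMerge_g,
            tok_skip _ _ hnop (fun h => hs (singles_sub_sym h)) (by simpa using hw) hn,
            bMerge_unitsOf rest]
termination_by cs.length
decreasing_by
  all_goals simp_all
  all_goals simpa [Nat.lt_succ_iff] using List.length_dropWhile_le pvIsWord rest

-- ===== VERDICT (by name: the statement is the Claim_ definition above) =====
theorem tokenize_sql_py_spec : Claim_equal_tokenize_sql_py := by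
  intro s _
  unfold Spec_tokenize_sql_py tokenize_sql_py tokenize_sql_py_alt
  rw [aLoop_eq, (phase1_both s.toList).1 [] (by simp)]
  simp [bMerge_unitsOf]
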